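-- pv_equiv track=rewrite | github.com/Anwarvic/Code-Switched-Corpus-Evaluator | evaluator.py | _count_alternations
-- ===== SOURCE A (Python) =====
-- def _count_alternations(tags, exclude_tags):
--     """
--     Counts the number of alternations between tags in an utterance
--     excluding the exclude_tags.
--
--     Parameters
--     ----------
--     tags : list
--         List of language tags in an utterance.
--     exclude_tags : set
--         A set of language-independent tags to exclude.
--
--     Returns
--     -------
--     alternations_count : int
--         Number of alternations between tags excluding the exclude_tags.
--
--     Examples
--     --------
--     >>> self._count_alternations(['O', 'O', 'O', 'O', 'O'], {'O'})
--     0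
--     >>> self._count_alternations(['ar', 'ar', 'O', 'en', 'ar'], {'O'})
--     2
--     """
--     alts = 0
--     i = 0
--     prev_tag = tags[i]
--     while(i < len(tags) and prev_tag in exclude_tags):
--         prev_tag = tags[i]
--         i += 1
--     # count alternations
--     for tag in tags[i:]:
--         if tag in exclude_tags:
--             continue
--         if tag != prev_tag:
--             alts += 1
--         prev_tag = tag
--     return alts
-- ===== SOURCE B (Python) =====
-- def _count_alternations(tags, exclude_tags):
--     kept = [t for t in tags if t not in exclude_tags]
--     return sum(a != b for a, b in zip(kept, kept[1:]))
-- ===== Notes on version B (the rewrite author's own statement) =====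
-- stated objective: idiomatic
-- what changed: Replaced the fused while-loop skip plus stateful for-loop scan by filter-then-pairwise: build the list of kept tags in one comprehension, then count adjacent unequal pairs with zip.
import Mathlib
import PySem

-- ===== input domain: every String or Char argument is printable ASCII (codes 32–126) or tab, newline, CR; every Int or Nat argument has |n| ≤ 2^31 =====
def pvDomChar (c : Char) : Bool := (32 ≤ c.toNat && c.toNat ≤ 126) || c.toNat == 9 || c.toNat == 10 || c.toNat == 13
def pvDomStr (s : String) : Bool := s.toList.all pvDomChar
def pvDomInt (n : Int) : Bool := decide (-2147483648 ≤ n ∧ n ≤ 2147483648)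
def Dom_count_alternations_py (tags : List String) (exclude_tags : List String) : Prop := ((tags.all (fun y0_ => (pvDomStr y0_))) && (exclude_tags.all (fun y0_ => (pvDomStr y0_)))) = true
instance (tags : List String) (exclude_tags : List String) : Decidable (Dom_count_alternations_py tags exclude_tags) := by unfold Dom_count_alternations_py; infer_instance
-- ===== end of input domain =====

-- B is the filter-then-pairwise decomposition of A's fused skip/scan loops; return value only.
-- ===== PORT A =====
-- A's while-loop: state (i, prev_tag); body 'prev_tag = tags[i]; i += 1' runs while i < len(tags) and prev_tag in exclude_tags.
def pvWhileA (tags : List String) (exclude_tags : List String) (i : Nat) (prev : String) :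
    Nat × String :=
  if h : i < tags.length ∧ prev ∈ exclude_tags then
    pvWhileA tags exclude_tags (i + 1) (tags[i]'h.1)
  else
    (i, prev)
termination_by tags.length - i
decreasing_by omega

-- A's for-loop over tags[i:] with state (alts, prev_tag).
def pvForA (exclude_tags : List String) (s : Int × String) (l : List String) : Int × String :=
  l.foldl
    (fun s tag =>
      if tag ∈ exclude_tags then s
      else if tag ≠ s.2 then (s.1 + 1, tag) else (s.1, tag))
    s

def count_alternations_py (tags : List String) (exclude_tags : List String) : Int :=
  match tags with
  | [] => 0  -- A raises IndexError on tags[0] here; excluded by Pre_count_alternations_py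
  | t :: _ =>
    let st := pvWhileA tags exclude_tags 0 t
    (pvForA exclude_tags (0, st.2) (tags.drop st.1)).1

-- ===== PORT B =====
def count_alternations_py_alt (tags : List String) (exclude_tags : List String) : Int :=
  let kept := tags.filter (fun t => t ∉ exclude_tags)
  (kept.zip (kept.drop 1)).foldl
    (fun acc p => acc + (if p.1 ≠ p.2 then (1 : Int) else 0)) 0

-- ===== PRECONDITION & SPEC =====
-- Pre_ excludes only the empty tags list, on which A raises IndexError.
def Pre_count_alternations_py (tags : List String) (exclude_tags : List String) : Prop :=
  tags ≠ []
instance (tags : List String) (exclude_tags : List String) : Decidable (Pre_count_alternations_py tags exclude_tags) := by unfold Pre_count_alternations_py; infer_instance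

def pvWitness_count_alternations_py : List String × List String := (["ar", "ar", "O", "en", "ar"], ["O"])

def Spec_count_alternations_py (tags : List String) (exclude_tags : List String) (out : Int) : Prop := out = count_alternations_py_alt tags exclude_tags
instance (tags : List String) (exclude_tags : List String) (out : Int) : Decidable (Spec_count_alternations_py tags exclude_tags out) := by unfold Spec_count_alternations_py; infer_instance

-- ===== CLAIM (what is proved, stated in full; the proofs are below) =====
def Claim_equal_count_alternations_py : Prop := ∀ (tags : List String) (exclude_tags : List String), Dom_count_alternations_py tags exclude_tags → Pre_count_alternations_py tags exclude_tags → Spec_count_alternations_py tags exclude_tags (count_alternations_py tags exclude_tags)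

-- ===== LEMMAS AND PROOFS =====

-- Reference: number of adjacent unequal pairs in a list.
def pvPc : List String → Int
  | a :: b :: r => (if a ≠ b then 1 else 0) + pvPc (b :: r)
  | _ => 0

theorem pvForA_cons (exclude_tags : List String) (s : Int × String) (tag : String)
    (l : List String) :
    pvForA exclude_tags s (tag :: l) =
      pvForA exclude_tags
        (if tag ∈ exclude_tags then s
         else if tag ≠ s.2 then (s.1 + 1, tag) else (s.1, tag)) l := rfl

theorem pvForA_eq (exclude_tags : List String) :
    ∀ (l : List String) (alts : Int) (prev : String),
      (pvForA exclude_tags (alts, prev) l).1 =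
        alts + pvPc (prev :: l.filter (fun t => t ∉ exclude_tags)) := by
  intro l
  induction l with
  | nil => intro alts prev; simp [pvForA, pvPc]
  | cons tag l ih =>
    intro alts prev
    rw [pvForA_cons]
    by_cases hmem : tag ∈ exclude_tags
    · rw [if_pos hmem, ih]
      simp [List.filter_cons, hmem]
    · rw [if_neg hmem]
      by_cases hne : tag = prev
      · subst hne
        simp only [ne_eq, not_true_eq_false, if_false, ite_self]
        rw [ih]
        simp [List.filter_cons, hmem, pvPc]
      · simp only [ne_eq, hne, not_false_eq_true, if_true]
        rw [ih]
        simp [List.filter_cons, hmem, pvPc, Ne.symm hne]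
        omega

theorem pvWhileA_eq (tags exclude_tags : List String) (i : Nat) (prev : String)
    (hprev : prev ∈ exclude_tags) :
    (pvForA exclude_tags (0, (pvWhileA tags exclude_tags i prev).2)
        (tags.drop (pvWhileA tags exclude_tags i prev).1)).1 =
      pvPc ((tags.drop i).filter (fun t => t ∉ exclude_tags)) := by
  rw [pvWhileA]
  by_cases h : i < tags.length
  · rw [dif_pos ⟨h, hprev⟩]
    have hdrop : tags.drop i = tags[i] :: tags.drop (i + 1) :=
      List.drop_eq_getElem_cons h
    by_cases hmem : tags[i] ∈ exclude_tags
    · rw [pvWhileA_eq tags exclude_tags (i + 1) (tags[i]'h) hmem]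
      rw [hdrop, List.filter_cons, if_neg (by simp [hmem])]
    · rw [pvWhileA, dif_neg (by simp [hmem])]
      simp only
      rw [pvForA_eq, hdrop, List.filter_cons, if_pos (by simp [hmem])]
      simp [pvPc]
  · rw [dif_neg (by simp [h])]
    simp only
    have hdrop : tags.drop i = [] := List.drop_eq_nil_of_le (by omega)
    rw [hdrop]
    simp [pvForA, pvPc]
termination_by tags.length - i
decreasing_by omega

-- B's zip-fold equals the pairwise reference count.
theorem pvZip_fold_eq (l : List String) :
    ∀ (acc : Int),
      ((l.zip (l.drop 1)).foldl
        (fun acc p => acc + (if p.1 ≠ p.2 then (1 : Int) else 0)) acc) = acc + pvPc l := by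
  induction l with
  | nil => intro acc; simp [pvPc]
  | cons a l ih =>
    intro acc
    match l with
    | [] => simp [pvPc]
    | b :: r =>
      simp only [List.drop_succ_cons, List.drop_zero, List.zip_cons_cons, List.foldl_cons]
      rw [show (b :: r).zip r = (b :: r).zip ((b :: r).drop 1) by rfl]
      rw [ih]
      simp [pvPc]
      omega

theorem pvB_eq_pvPc (tags exclude_tags : List String) :
    count_alternations_py_alt tags exclude_tags =
      pvPc (tags.filter (fun t => t ∉ exclude_tags)) := by
  unfold count_alternations_py_alt
  rw [pvZip_fold_eq]
  simp

-- ===== VERDICT (by name: the statement is the Claim_ definition above) =====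
theorem count_alternations_py_spec : Claim_equal_count_alternations_py := by
  intro tags exclude_tags _ hpre
  unfold Spec_count_alternations_py count_alternations_py
  match tags with
  | [] => exact absurd rfl hpre
  | t :: rest =>
    simp only
    rw [pvB_eq_pvPc]
    by_cases ht : t ∈ exclude_tags
    · rw [pvWhileA_eq (t :: rest) exclude_tags 0 t ht]
      simp
    · rw [pvWhileA, dif_neg (by simp [ht])]
      simp only [List.drop_zero]
      rw [pvForA_eq]
      simp [List.filter_cons, ht, pvPc]
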